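-- pv_equiv track=rewrite | github.com/Buscedv/Ask | ask.py | insert_indention_group_markers
-- ===== SOURCE A (Python) =====
-- def tokens_grouped_by_lines(tokens):
-- 	tmp = []
-- 	lines = []
--
-- 	for token_index, token in enumerate(tokens):
-- 		token_type = token[0]
-- 		token_val = token[1]
--
-- 		if token_type == 'OP' and token_val in ['\n', '\t']:
-- 			token_type = 'FORMAT'
--
-- 		if token_type == 'FORMAT' and token_val == '\n':
-- 			lines.append(tmp)
-- 			tmp = []
--
-- 		tmp.append([token_type, token_val])
--
-- 	if tmp:
-- 		lines.append(tmp)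
--
-- 	return lines
--
-- def insert_indention_group_markers(tokens):
-- 	lines = tokens_grouped_by_lines(tokens)
--
-- 	marked = []
-- 	previous_line_tabs = 0
-- 	current_line_tabs = 0
-- 	group_start_counter = 0
--
-- 	for line in lines:
-- 		previous_line_tabs = current_line_tabs
-- 		current_line_tabs = 0
--
-- 		# Counts the number of indents at the start of the line.
-- 		for token_index, token in enumerate(line):
-- 			token_type = token[0]
-- 			token_val = token[1]
--
-- 			# The line has "started", meaning no more leading tabs.
-- 			if token_type != 'FORMAT':
-- 				break
--
-- 			# Is FORMAT, meaning \n or \t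
-- 			if token_val == '\t':
-- 				current_line_tabs += 1
--
-- 		# Insert group start/end markings
-- 		if current_line_tabs < previous_line_tabs:
-- 			marked.append(['GROUP', 'end'])
-- 			group_start_counter -= 1
-- 		elif current_line_tabs > previous_line_tabs:
-- 			marked.append(['GROUP', 'start'])
-- 			group_start_counter += 1
--
-- 		# Inserts the rest of the lines token after the marking(s)
-- 		for token in line:
-- 			marked.append(token)
--
-- 	# Inserts a leading marker
-- 	marked.insert(0, ['GROUP', 'start'])
-- 	group_start_counter += 1
--
-- 	# Inserts missing group end markings:
-- 	for _ in range(group_start_counter):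
-- 		marked.append(['GROUP', 'end'])
--
-- 	return marked
-- ===== SOURCE B (Python) =====
-- def insert_indention_group_markers(tokens):
-- 	out = []
-- 	buf = []
-- 	tabs = 0
-- 	in_prefix = True
-- 	prev_tabs = 0
-- 	open_groups = 0
--
-- 	def flush():
-- 		nonlocal open_groups
-- 		if tabs < prev_tabs:
-- 			out.append(['GROUP', 'end'])
-- 			open_groups -= 1
-- 		elif tabs > prev_tabs:
-- 			out.append(['GROUP', 'start'])
-- 			open_groups += 1
-- 		out.extend(buf)
--
-- 	for token in tokens:
-- 		token_type, token_val = token[0], token[1]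
-- 		if token_type == 'OP' and token_val in ('\n', '\t'):
-- 			token_type = 'FORMAT'
-- 		if token_type == 'FORMAT' and token_val == '\n':
-- 			# the newline opens the next line: finalize the buffered one
-- 			flush()
-- 			prev_tabs = tabs
-- 			buf = [[token_type, token_val]]
-- 			tabs = 0
-- 			in_prefix = True
-- 		else:
-- 			if in_prefix and token_type == 'FORMAT':
-- 				if token_val == '\t':
-- 					tabs += 1
-- 			else:
-- 				in_prefix = False
-- 			buf.append([token_type, token_val])
--
-- 	if buf:
-- 		flush()
--
-- 	return [['GROUP', 'start']] + out + [['GROUP', 'end']] * (open_groups + 1)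
-- ===== Notes on version B (the rewrite author's own statement) =====
-- stated objective: alternative
-- what changed: B drops the tokens_grouped_by_lines helper and its intermediate list-of-lines: one pass over the token stream buffers the current line, counts its leading tabs incrementally with an in-prefix flag, and emits the group marker plus the line when the next newline (or the end) finalizes it.
import Mathlib
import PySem

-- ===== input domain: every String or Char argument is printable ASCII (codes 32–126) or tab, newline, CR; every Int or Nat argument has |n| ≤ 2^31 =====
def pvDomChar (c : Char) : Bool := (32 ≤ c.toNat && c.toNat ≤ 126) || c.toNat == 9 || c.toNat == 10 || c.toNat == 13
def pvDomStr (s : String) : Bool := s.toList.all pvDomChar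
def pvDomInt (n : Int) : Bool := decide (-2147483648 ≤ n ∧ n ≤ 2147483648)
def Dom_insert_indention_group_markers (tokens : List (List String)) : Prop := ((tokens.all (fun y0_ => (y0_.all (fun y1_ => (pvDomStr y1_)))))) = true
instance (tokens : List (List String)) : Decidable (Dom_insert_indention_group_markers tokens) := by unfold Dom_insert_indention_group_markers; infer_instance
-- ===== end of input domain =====

-- B makes one pass over the token stream (no intermediate lines-of-tokens list),
-- counting leading tabs incrementally while buffering the current line; same return value.

-- ===== PORT A =====
-- the OP → FORMAT relabel (these two Python lines appear verbatim in A and in B)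
def pvRelabel (token : List String) : String × String :=
  let tt0 := token.getD 0 ""
  let tv := token.getD 1 ""
  (if tt0 = "OP" ∧ (tv = "\n" ∨ tv = "\t") then "FORMAT" else tt0, tv)

-- one loop step of tokens_grouped_by_lines: state = (tmp, lines)
def pvTglStep (st : List (List String) × List (List (List String))) (token : List String) :
    List (List String) × List (List (List String)) :=
  let p := pvRelabel token
  let st' := if p.1 = "FORMAT" ∧ p.2 = "\n" then ([], st.2 ++ [st.1]) else st
  (st'.1 ++ [[p.1, p.2]], st'.2)

def pvTokensGroupedByLines (tokens : List (List String)) : List (List (List String)) :=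
  let st := tokens.foldl pvTglStep ([], [])
  if st.1 ≠ [] then st.2 ++ [st.1] else st.2

-- the inner for-loop with break: counts leading '\t's among the leading FORMAT tokens
def pvCountTabs : List (List String) → Int
  | [] => 0
  | t :: rest =>
    if t.getD 0 "" ≠ "FORMAT" then 0
    else (if t.getD 1 "" = "\t" then 1 else 0) + pvCountTabs rest

-- one step of the main for-loop: state = (marked, current_line_tabs, group_start_counter)
def pvMainStep (st : List (List String) × Int × Int) (line : List (List String)) :
    List (List String) × Int × Int :=
  let prev := st.2.1
  let cur := pvCountTabs line
  let mc : List (List String) × Int :=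
    if cur < prev then (st.1 ++ [["GROUP", "end"]], st.2.2 - 1)
    else if prev < cur then (st.1 ++ [["GROUP", "start"]], st.2.2 + 1)
    else (st.1, st.2.2)
  (mc.1 ++ line, cur, mc.2)

def insert_indention_group_markers (tokens : List (List String)) : List (List String) :=
  let lines := pvTokensGroupedByLines tokens
  let st := lines.foldl pvMainStep ([], 0, 0)
  (["GROUP", "start"] :: st.1) ++ List.replicate (st.2.2 + 1).toNat ["GROUP", "end"]

-- ===== PORT B =====
structure PvBState where
  out : List (List String)
  buf : List (List String)
  tabs : Int
  pfx : Bool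
  prev : Int
  cnt : Int
deriving Repr, DecidableEq

-- flush(): emit marker for the buffered line, then the line itself; returns (out, new prev, cnt)
def pvFlush (s : PvBState) : List (List String) × Int × Int :=
  if s.tabs < s.prev then (s.out ++ [["GROUP", "end"]] ++ s.buf, s.tabs, s.cnt - 1)
  else if s.prev < s.tabs then (s.out ++ [["GROUP", "start"]] ++ s.buf, s.tabs, s.cnt + 1)
  else (s.out ++ s.buf, s.tabs, s.cnt)

def pvBStep (s : PvBState) (token : List String) : PvBState :=
  let p := pvRelabel token
  if p.1 = "FORMAT" ∧ p.2 = "\n" then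
    let r := pvFlush s
    { out := r.1, buf := [[p.1, p.2]], tabs := 0, pfx := true, prev := r.2.1, cnt := r.2.2 }
  else
    { s with
      buf := s.buf ++ [[p.1, p.2]],
      tabs := s.tabs + (if s.pfx ∧ p.1 = "FORMAT" ∧ p.2 = "\t" then 1 else 0),
      pfx := s.pfx && (p.1 == "FORMAT") }

def insert_indention_group_markers_alt (tokens : List (List String)) : List (List String) :=
  let s := tokens.foldl pvBStep ⟨[], [], 0, true, 0, 0⟩
  let r := if s.buf ≠ [] then pvFlush s else (s.out, s.prev, s.cnt)
  (["GROUP", "start"] :: r.1) ++ List.replicate (r.2.2 + 1).toNat ["GROUP", "end"]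

-- ===== PRECONDITION & SPEC =====
-- Python A evaluates token[1] on every token: a token of length < 2 raises IndexError.
def Pre_insert_indention_group_markers (tokens : List (List String)) : Prop :=
  ∀ t ∈ tokens, 2 ≤ t.length
instance (tokens : List (List String)) : Decidable (Pre_insert_indention_group_markers tokens) := by
  unfold Pre_insert_indention_group_markers; infer_instance

def pvWitness_insert_indention_group_markers : List (List String) :=
  [["KEYWORD", "if"], ["OP", "\n"], ["OP", "\t"], ["NUMBER", "1"]]

def Spec_insert_indention_group_markers (tokens : List (List String)) (out : List (List String)) : Prop := out = insert_indention_group_markers_alt tokens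
instance (tokens : List (List String)) (out : List (List String)) : Decidable (Spec_insert_indention_group_markers tokens out) := by unfold Spec_insert_indention_group_markers; infer_instance

-- ===== CLAIM (what is proved, stated in full; the proofs are below) =====
def Claim_equal_insert_indention_group_markers : Prop := ∀ (tokens : List (List String)), Dom_insert_indention_group_markers tokens → Pre_insert_indention_group_markers tokens → Spec_insert_indention_group_markers tokens (insert_indention_group_markers tokens)

-- ===== LEMMAS AND PROOFS =====

-- the invariant tying B's one-pass state to A's staged state (tmp, lines)
def pvInv (s : PvBState) (ast : List (List String) × List (List (List String))) : Prop :=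
  s.buf = ast.1 ∧
  s.tabs = pvCountTabs ast.1 ∧
  s.pfx = ast.1.all (fun t => t.getD 0 "" == "FORMAT") ∧
  (s.out, s.prev, s.cnt) = ast.2.foldl pvMainStep ([], 0, 0)

lemma pvCountTabs_append (l : List (List String)) (x : List String) :
    pvCountTabs (l ++ [x]) =
      pvCountTabs l +
        (if (l.all (fun t => t.getD 0 "" == "FORMAT")) ∧ x.getD 0 "" = "FORMAT" ∧ x.getD 1 "" = "\t"
          then 1 else 0) := by
  induction l with
  | nil =>
    simp only [List.nil_append, pvCountTabs, List.all_nil, true_and, zero_add]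
    split_ifs <;> simp_all
  | cons t rest ih =>
    simp only [List.cons_append, pvCountTabs, List.all_cons, ih]
    split_ifs <;> simp_all <;> omega

lemma pvFlush_eq_mainStep (s : PvBState) (tmp : List (List String))
    (hb : s.buf = tmp) (ht : s.tabs = pvCountTabs tmp) :
    pvFlush s = pvMainStep (s.out, s.prev, s.cnt) tmp := by
  unfold pvFlush pvMainStep
  simp only [hb, ht]
  split_ifs <;> simp_all

lemma pvInv_step (s : PvBState) (ast : List (List String) × List (List (List String)))
    (t : List String) (h : pvInv s ast) : pvInv (pvBStep s t) (pvTglStep ast t) := by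
  obtain ⟨hb, ht, hp, ho⟩ := h
  unfold pvBStep pvTglStep
  rcases hP : pvRelabel t with ⟨tt, tv⟩
  simp only [hP]
  by_cases hnl : tt = "FORMAT" ∧ tv = "\n"
  · rw [if_pos hnl, if_pos hnl]
    have hflush : pvFlush s = pvMainStep (s.out, s.prev, s.cnt) ast.1 :=
      pvFlush_eq_mainStep s ast.1 hb ht
    refine ⟨rfl, ?_, ?_, ?_⟩
    · simp [pvCountTabs, hnl.1, hnl.2]
    · simp [List.all_cons, hnl.1]
    · simp only [hflush, ho, List.foldl_append, List.foldl_cons, List.foldl_nil]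
  · rw [if_neg hnl, if_neg hnl]
    refine ⟨by simp [hb], ?_, ?_, by simpa using ho⟩
    · have e1 : ([tt, tv] : List String).getD 0 "" = tt := rfl
      have e2 : ([tt, tv] : List String).getD 1 "" = tv := rfl
      rw [hb, ht, hp, pvCountTabs_append, e1, e2]
    · rw [hb, hp, List.all_append, List.all_cons, List.all_nil, Bool.and_true]
      rfl

lemma pvInv_foldl (tokens : List (List String)) :
    pvInv (tokens.foldl pvBStep ⟨[], [], 0, true, 0, 0⟩)
          (tokens.foldl pvTglStep ([], [])) := by
  induction tokens using List.reverseRecOn with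
  | nil => exact ⟨rfl, rfl, rfl, rfl⟩
  | append_singleton l t ih =>
    simp only [List.foldl_append, List.foldl_cons, List.foldl_nil]
    exact pvInv_step _ _ t ih

-- ===== VERDICT (by name: the statement is the Claim_ definition above) =====
theorem insert_indention_group_markers_spec : Claim_equal_insert_indention_group_markers := by
  intro tokens _ _
  unfold Spec_insert_indention_group_markers insert_indention_group_markers
    insert_indention_group_markers_alt pvTokensGroupedByLines
  obtain ⟨hb, ht, hp, ho⟩ := pvInv_foldl tokens
  set s := tokens.foldl pvBStep ⟨[], [], 0, true, 0, 0⟩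
  set ast := tokens.foldl pvTglStep (([], []) : List (List String) × List (List (List String)))
  by_cases hemp : ast.1 = []
  · have : s.buf = [] := by rw [hb, hemp]
    simp only [hemp, ne_eq, not_true_eq_false, if_false, this, ← ho]
  · have hbne : s.buf ≠ [] := by rw [hb]; exact hemp
    simp only [hemp, ne_eq, not_false_eq_true, if_true, hbne,
      List.foldl_append, List.foldl_cons, List.foldl_nil, ← ho,
      pvFlush_eq_mainStep s ast.1 hb ht]
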